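-- pv_equiv track=rewrite | github.com/sigalrmp/puzzles-2022 | hashi/hashi_board.py | board_to_grid
-- ===== SOURCE A (Python) =====
-- def board_dims(board):
--     max_x = 0
--     max_y = 0
--     for n in board:
--         max_x = max(max_x, n[0])
--         max_y = max(max_y, n[1])
--     return {'x': max_x + 1, 'y': max_y + 1}
--
-- def first_node(board):
--     min_x = 0
--     min_y = 0
--     for n in board:
--         min_x = min(min_x, n[0])
--         min_y = min(min_y, n[1])
--     return (min_x, min_y)
--
-- def last_node(board):
--     dims = board_dims(board)
--     return (dims['x'] - 1, dims['y'] - 1)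
--
-- def board_to_grid(board):
--     first = first_node(board)
--     last = last_node(board)
--     grid = []
--     for x in range(first[0], last[0] + 1):
--         row = []
--         for y in range(first[1], last[1] + 1):
--             n = 0 if not (x, y) in board else board[(x, y)]['rem']
--             row += [n]
--         grid += [row]
--     return grid
-- ===== SOURCE B (Python) =====
-- def board_to_grid(board):
--     xs = [0] + [x for x, _ in board]
--     ys = [0] + [y for _, y in board]
--     first_x, first_y = min(xs), min(ys)
--     height = max(xs) - first_x + 1
--     width = max(ys) - first_y + 1
--     grid = [[0] * width for _ in range(height)]
--     for (x, y), node in board.items():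
--         grid[x - first_x][y - first_y] = node['rem']
--     return grid
-- ===== Notes on version B (the rewrite author's own statement) =====
-- stated objective: alternative
-- what changed: A tests every cell of the bounding rectangle for membership in the dict; B allocates a zero grid once and scatters each node's 'rem' into it in a single pass over the dict.
import Mathlib
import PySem

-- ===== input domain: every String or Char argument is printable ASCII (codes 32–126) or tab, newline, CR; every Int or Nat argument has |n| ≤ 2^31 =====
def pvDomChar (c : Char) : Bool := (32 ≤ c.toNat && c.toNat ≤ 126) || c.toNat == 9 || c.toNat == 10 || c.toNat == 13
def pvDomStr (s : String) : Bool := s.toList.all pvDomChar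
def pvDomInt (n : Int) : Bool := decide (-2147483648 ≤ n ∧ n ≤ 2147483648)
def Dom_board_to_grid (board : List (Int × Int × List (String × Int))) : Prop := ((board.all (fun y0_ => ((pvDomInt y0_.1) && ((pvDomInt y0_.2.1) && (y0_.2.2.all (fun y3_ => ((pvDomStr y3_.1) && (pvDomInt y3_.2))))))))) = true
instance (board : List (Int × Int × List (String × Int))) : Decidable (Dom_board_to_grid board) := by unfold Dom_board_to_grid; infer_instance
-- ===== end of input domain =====

-- B replaces A's per-cell membership test over the whole rectangle by allocating a zero
-- grid and scattering each node's 'rem' once (objective: alternative decomposition).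
-- The Python board dict is the List of (x, y, value-dict) triples; lookup = first match.

-- ===== PORT A =====
def board_dims (board : List (Int × Int × List (String × Int))) : PySem.Dict String Int :=
  let m := board.foldl (fun (m : Int × Int) n => (max m.1 n.1, max m.2 n.2.1)) ((0 : Int), (0 : Int))
  PySem.Dict.mk [("x", m.1 + 1), ("y", m.2 + 1)]

def first_node (board : List (Int × Int × List (String × Int))) : Int × Int :=
  board.foldl (fun (m : Int × Int) n => (min m.1 n.1, min m.2 n.2.1)) ((0 : Int), (0 : Int))

-- dims['x'] / dims['y']: the keys are always present, so getD's default is never used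
def last_node (board : List (Int × Int × List (String × Int))) : Int × Int :=
  let dims := board_dims board
  (PySem.Dict.getD dims "x" 0 - 1, PySem.Dict.getD dims "y" 0 - 1)

-- '(x, y) in board' / 'board[(x, y)]' are membership / first-match lookup on the association
-- list; board[(x,y)]['rem'] via getD 0 is exact on Pre_ (key 'rem' present; else Python raises)
def board_to_grid (board : List (Int × Int × List (String × Int))) : List (List Int) :=
  let first := first_node board
  let last := last_node board
  (PySem.List.pyRange first.1 (last.1 + 1) 1).foldl (fun grid x =>
    grid ++ [(PySem.List.pyRange first.2 (last.2 + 1) 1).foldl (fun row y =>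
      let n : Int :=
        if ¬ board.any (fun e => e.1 == x && e.2.1 == y) then 0
        else match board.find? (fun e => e.1 == x && e.2.1 == y) with
             | some e => PySem.Dict.getD (PySem.Dict.mk e.2.2) "rem" 0
             | none => 0   -- unreachable: membership just succeeded
      row ++ [n]) []]) []

-- ===== PORT B =====
-- node['rem'] via getD 0 is exact on Pre_ (key 'rem' present; else Python raises);
-- grid[x-fx][y-fy] = … is List.modify/List.set (the indices are always in range)
def board_to_grid_alt (board : List (Int × Int × List (String × Int))) : List (List Int) :=
  let xs : List Int := 0 :: board.map (fun e => e.1)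
  let ys : List Int := 0 :: board.map (fun e => e.2.1)
  let fx := (PySem.List.min? xs (fun v => v)).getD 0   -- xs nonempty: min() never raises
  let fy := (PySem.List.min? ys (fun v => v)).getD 0
  let height := ((PySem.List.max? xs (fun v => v)).getD 0 - fx + 1).toNat
  let width := ((PySem.List.max? ys (fun v => v)).getD 0 - fy + 1).toNat
  let grid := List.replicate height (List.replicate width (0 : Int))
  board.foldl (fun g e =>
    g.modify (e.1 - fx).toNat (fun row =>
      row.set (e.2.1 - fy).toNat (PySem.Dict.getD (PySem.Dict.mk e.2.2) "rem" 0))) grid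

-- ===== PRECONDITION & SPEC =====
-- Pre_ excludes (a) boards whose value dict lacks the key "rem" — there Python A raises
-- KeyError — and (b) association lists with duplicate keys (outer node keys or inner string
-- keys), which do not represent a Python dict at all (the dict the caller passes has unique
-- keys); on such lists neither program represents any Python run.
def Pre_board_to_grid (board : List (Int × Int × List (String × Int))) : Prop :=
  (board.map (fun e => (e.1, e.2.1))).Nodup ∧
  ∀ e ∈ board, (e.2.2.map Prod.fst).Nodup ∧ "rem" ∈ e.2.2.map Prod.fst
instance (board : List (Int × Int × List (String × Int))) : Decidable (Pre_board_to_grid board) := by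
  unfold Pre_board_to_grid; infer_instance

def pvWitness_board_to_grid : (List (Int × Int × List (String × Int))) :=
  [(0, 0, [("rem", 3)]), (2, -1, [("rem", 1)])]

def Spec_board_to_grid (board : List (Int × Int × List (String × Int))) (out : List (List Int)) : Prop := out = board_to_grid_alt board
instance (board : List (Int × Int × List (String × Int))) (out : List (List Int)) : Decidable (Spec_board_to_grid board out) := by unfold Spec_board_to_grid; infer_instance

-- ===== CLAIM (what is proved, stated in full; the proofs are below) =====
def Claim_equal_board_to_grid : Prop := ∀ (board : List (Int × Int × List (String × Int))), Dom_board_to_grid board → Pre_board_to_grid board → Spec_board_to_grid board (board_to_grid board)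

-- ===== LEMMAS AND PROOFS =====

-- abbreviations used only by the proofs
def pvRem (e : Int × Int × List (String × Int)) : Int :=
  PySem.Dict.getD (PySem.Dict.mk e.2.2) "rem" 0

def pvCell (g : List (List Int)) (i j : Nat) : Int := (g.getD i []).getD j 0

-- the pair folds of first_node / board_dims, componentwise
theorem pv_fold_min_pair (board : List (Int × Int × List (String × Int))) (a b : Int) :
    board.foldl (fun (m : Int × Int) n => (min m.1 n.1, min m.2 n.2.1)) (a, b) =
      (board.foldl (fun m n => min m n.1) a, board.foldl (fun m n => min m n.2.1) b) := by
  induction board generalizing a b with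
  | nil => rfl
  | cons e t ih => simpa using ih (min a e.1) (min b e.2.1)

theorem pv_fold_max_pair (board : List (Int × Int × List (String × Int))) (a b : Int) :
    board.foldl (fun (m : Int × Int) n => (max m.1 n.1, max m.2 n.2.1)) (a, b) =
      (board.foldl (fun m n => max m n.1) a, board.foldl (fun m n => max m n.2.1) b) := by
  induction board generalizing a b with
  | nil => rfl
  | cons e t ih => simpa using ih (max a e.1) (max b e.2.1)

theorem pv_foldl_min_le_init {α : Type} (f : α → Int) (l : List α) (a : Int) :
    l.foldl (fun m n => min m (f n)) a ≤ a := by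
  induction l generalizing a with
  | nil => simp
  | cons x t ih => exact le_trans (ih (min a (f x))) (min_le_left _ _)

theorem pv_foldl_min_le {α : Type} (f : α → Int) (l : List α) (a : Int) (e : α) (he : e ∈ l) :
    l.foldl (fun m n => min m (f n)) a ≤ f e := by
  induction l generalizing a with
  | nil => cases he
  | cons x t ih =>
    rcases List.mem_cons.mp he with rfl | he'
    · exact le_trans (pv_foldl_min_le_init f t (min a (f e))) (min_le_right _ _)
    · exact ih _ he'

-- one update of B's scatter loop, seen through pvCell
theorem pv_cell_step (fx fy : Int) (g : List (List Int)) (e : Int × Int × List (String × Int))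
    (i j : Nat) (hi : i < g.length) (hj : j < (g.getD i []).length) :
    pvCell (g.modify (e.1 - fx).toNat (fun row => row.set (e.2.1 - fy).toNat (pvRem e))) i j =
      if ((e.1 - fx).toNat == i) && ((e.2.1 - fy).toNat == j) then pvRem e else pvCell g i j := by
  have hj' : j < g[i].length := by
    simpa [List.getD_eq_getElem?_getD, List.getElem?_eq_getElem hi] using hj
  by_cases h1 : (e.1 - fx).toNat = i <;> by_cases h2 : (e.2.1 - fy).toNat = j
  · simp [pvCell, List.getD_eq_getElem?_getD, List.getElem?_eq_getElem hi, h1, h2,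
      List.getElem?_set, hj']
  · simp [pvCell, List.getD_eq_getElem?_getD, List.getElem?_modify,
      List.getElem?_eq_getElem hi, h1, h2, List.getElem?_set]
  · simp [pvCell, List.getD_eq_getElem?_getD, List.getElem?_modify,
      List.getElem?_eq_getElem hi, h1, h2, List.getElem?_set, hj']
  · simp [pvCell, List.getD_eq_getElem?_getD, List.getElem?_modify,
      List.getElem?_eq_getElem hi, h1]

theorem pv_step_row_length (fx fy : Int) (g : List (List Int)) (e : Int × Int × List (String × Int)) (i : Nat) :
    ((g.modify (e.1 - fx).toNat (fun row => row.set (e.2.1 - fy).toNat (pvRem e))).getD i []).length =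
      (g.getD i []).length := by
  rcases h : g[i]? with _ | row
  · simp [List.getD_eq_getElem?_getD, List.getElem?_modify, h]
  · simp [List.getD_eq_getElem?_getD, List.getElem?_modify, h]
    split <;> simp

-- the whole scatter loop, seen through pvCell: the LAST matching entry wins
theorem pv_scatter_cell (fx fy : Int) (es : List (Int × Int × List (String × Int)))
    (g : List (List Int)) (i j : Nat) (hi : i < g.length) (hj : j < (g.getD i []).length) :
    pvCell (es.foldl (fun g e =>
        g.modify (e.1 - fx).toNat (fun row => row.set (e.2.1 - fy).toNat (pvRem e))) g) i j =
      match es.reverse.find? (fun e => ((e.1 - fx).toNat == i) && ((e.2.1 - fy).toNat == j)) with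
      | some e => pvRem e
      | none => pvCell g i j := by
  induction es generalizing g with
  | nil => rfl
  | cons e t ih =>
    rw [List.foldl_cons]
    have hi' : i < (g.modify (e.1 - fx).toNat
        (fun row => row.set (e.2.1 - fy).toNat (pvRem e))).length := by simpa using hi
    have hj' : j < ((g.modify (e.1 - fx).toNat
        (fun row => row.set (e.2.1 - fy).toNat (pvRem e))).getD i []).length := by
      rw [pv_step_row_length]; exact hj
    rw [ih _ hi' hj', List.reverse_cons, List.find?_append,
      pv_cell_step fx fy g e i j hi hj]
    rcases h : t.reverse.find? (fun e => ((e.1 - fx).toNat == i) && ((e.2.1 - fy).toNat == j)) with _ | e'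
    · rw [h]
      cases hp : (((e.1 - fx).toNat == i) && ((e.2.1 - fy).toNat == j)) with
      | true => simp [hp]
      | false => simp [hp]
    · rw [h]
      simp

theorem pv_scatter_length (fx fy : Int) (es : List (Int × Int × List (String × Int))) (g : List (List Int)) :
    (es.foldl (fun g e =>
        g.modify (e.1 - fx).toNat (fun row => row.set (e.2.1 - fy).toNat (pvRem e))) g).length = g.length := by
  induction es generalizing g with
  | nil => rfl
  | cons e t ih => rw [List.foldl_cons, ih]; simp

theorem pv_scatter_row_length (fx fy : Int) (es : List (Int × Int × List (String × Int)))
    (g : List (List Int)) (i : Nat) :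
    ((es.foldl (fun g e =>
        g.modify (e.1 - fx).toNat (fun row => row.set (e.2.1 - fy).toNat (pvRem e))) g).getD i []).length =
      (g.getD i []).length := by
  induction es generalizing g with
  | nil => rfl
  | cons e t ih => rw [List.foldl_cons, ih, pv_step_row_length]

-- a nonempty filter whose key column is Nodup and constant has exactly one element
theorem pv_head?_eq_getLast? {α : Type} (l : List α) (h : l.length ≤ 1) : l.head? = l.getLast? := by
  match l, h with
  | [], _ => rfl
  | [a], _ => rfl

theorem pv_fx_le (board : List (Int × Int × List (String × Int)))
    (e : Int × Int × List (String × Int)) (he : e ∈ board) :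
    board.foldl (fun m n => min m n.1) 0 ≤ e.1 :=
  pv_foldl_min_le (fun n => n.1) board 0 e he

theorem pv_fy_le (board : List (Int × Int × List (String × Int)))
    (e : Int × Int × List (String × Int)) (he : e ∈ board) :
    board.foldl (fun m n => min m n.2.1) 0 ≤ e.2.1 :=
  pv_foldl_min_le (fun n => n.2.1) board 0 e he

theorem pv_getD_row (g : List (List Int)) (i : Nat) (hi : i < g.length) :
    g.getD i [] = g[i] := by
  simp [List.getD_eq_getElem?_getD, List.getElem?_eq_getElem hi]

theorem pv_getElem_eq_cell (g : List (List Int)) (i j : Nat) (hi : i < g.length)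
    (hj : j < g[i].length) : g[i][j] = pvCell g i j := by
  rw [pvCell, pv_getD_row g i hi, List.getD_eq_getElem?_getD,
    List.getElem?_eq_getElem hj, Option.getD_some]

theorem pv_flatten_singleton {α β : Type} (l : List α) (f : α → β) :
    (l.map (fun x => [f x])).flatten = l.map f := by
  induction l with
  | nil => rfl
  | cons a t ih => simp [ih]

-- the scatter's last-match lookup agrees with A's first-match dict lookup (unique keys)
theorem pv_cell_eq (board : List (Int × Int × List (String × Int)))
    (hnd : (board.map (fun e => (e.1, e.2.1))).Nodup)
    (fx fy : Int) (hfx : fx = board.foldl (fun m n => min m n.1) 0)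
    (hfy : fy = board.foldl (fun m n => min m n.2.1) 0) (i j : Nat) :
    (if ¬ board.any (fun e => e.1 == fx + (i : Int) && e.2.1 == fy + (j : Int)) then 0
     else match board.find? (fun e => e.1 == fx + (i : Int) && e.2.1 == fy + (j : Int)) with
          | some e => pvRem e
          | none => 0) =
    match board.reverse.find? (fun e => ((e.1 - fx).toNat == i) && ((e.2.1 - fy).toNat == j)) with
    | some e => pvRem e
    | none => 0 := by
  have hag : ∀ e ∈ board.reverse,
      (((e.1 - fx).toNat == i) && ((e.2.1 - fy).toNat == j)) =
        (e.1 == fx + (i : Int) && e.2.1 == fy + (j : Int)) := by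
    intro e he
    rw [List.mem_reverse] at he
    have h1 := pv_fx_le board e he
    have h2 := pv_fy_le board e he
    rw [← hfx] at h1
    rw [← hfy] at h2
    rw [Bool.eq_iff_iff]
    simp only [Bool.and_eq_true, beq_iff_eq]
    omega
  have hrev : board.reverse.find?
        (fun e => ((e.1 - fx).toNat == i) && ((e.2.1 - fy).toNat == j)) =
      (board.filter (fun e => e.1 == fx + (i : Int) && e.2.1 == fy + (j : Int))).getLast? := by
    rw [← List.head?_filter, List.filter_congr hag, List.filter_reverse,
      ← List.getLast?_eq_head?_reverse]
  have hsub : (board.filter (fun e => e.1 == fx + (i : Int) && e.2.1 == fy + (j : Int))).Sublist board :=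
    List.filter_sublist
  have hnd' : ((board.filter (fun e => e.1 == fx + (i : Int) && e.2.1 == fy + (j : Int))).map
      (fun e => (e.1, e.2.1))).Nodup := (hsub.map _).nodup hnd
  have hlen : (board.filter (fun e => e.1 == fx + (i : Int) && e.2.1 == fy + (j : Int))).length ≤ 1 := by
    rcases hl : board.filter (fun e => e.1 == fx + (i : Int) && e.2.1 == fy + (j : Int)) with _ | ⟨a, _ | ⟨b, t⟩⟩
    · simp [hl]
    · simp [hl]
    · exfalso
      have ha := List.of_mem_filter (l := board) (p := fun e => e.1 == fx + (i : Int) && e.2.1 == fy + (j : Int))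
        (a := a) (by rw [hl]; exact List.mem_cons_self)
      have hb := List.of_mem_filter (l := board) (p := fun e => e.1 == fx + (i : Int) && e.2.1 == fy + (j : Int))
        (a := b) (by rw [hl]; exact List.mem_cons_of_mem _ List.mem_cons_self)
      rw [hl] at hnd'
      simp only [Bool.and_eq_true, beq_iff_eq] at ha hb
      simp only [List.map_cons, List.nodup_cons, List.mem_cons, List.mem_map, not_or] at hnd'
      exact hnd'.1.1 (by rw [ha.1, ha.2, hb.1, hb.2])
  rw [hrev, ← pv_head?_eq_getLast? _ hlen, List.head?_filter]
  rcases hf : board.find? (fun e => e.1 == fx + (i : Int) && e.2.1 == fy + (j : Int)) with _ | e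
  · have hany : ¬ board.any (fun e => e.1 == fx + (i : Int) && e.2.1 == fy + (j : Int)) = true := by
      rw [List.find?_eq_none] at hf
      simp only [List.any_eq_true, not_exists]
      intro x hx
      exact absurd hx (by intro h; exact hf x h.1 h.2)
    simp [hany, hf]
  · have hmem := List.mem_of_find?_eq_some hf
    have hpe := List.find?_some hf
    have hany : board.any (fun e => e.1 == fx + (i : Int) && e.2.1 == fy + (j : Int)) = true :=
      List.any_eq_true.mpr ⟨e, hmem, hpe⟩
    simp [hany, hf]

theorem pv_equal (board : List (Int × Int × List (String × Int)))
    (hnd : (board.map (fun e => (e.1, e.2.1))).Nodup) :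
    board_to_grid board = board_to_grid_alt board := by
  have hA : board_to_grid board =
      (PySem.List.pyRange (board.foldl (fun m n => min m n.1) 0)
          (board.foldl (fun m n => max m n.1) 0 + 1) 1).map (fun x =>
        (PySem.List.pyRange (board.foldl (fun m n => min m n.2.1) 0)
            (board.foldl (fun m n => max m n.2.1) 0 + 1) 1).map (fun y =>
          if ¬ board.any (fun e => e.1 == x && e.2.1 == y) then 0
          else match board.find? (fun e => e.1 == x && e.2.1 == y) with
               | some e => pvRem e
               | none => 0)) := by
    simp [board_to_grid, first_node, last_node, board_dims, pv_fold_min_pair,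
      pv_fold_max_pair, PySem.Dict.getD, PySem.Dict.get?_mk_cons, pvRem,
      pv_flatten_singleton]
  have hB : board_to_grid_alt board =
      board.foldl (fun g e =>
          g.modify (e.1 - board.foldl (fun m n => min m n.1) 0).toNat (fun row =>
            row.set (e.2.1 - board.foldl (fun m n => min m n.2.1) 0).toNat (pvRem e)))
        (List.replicate (board.foldl (fun m n => max m n.1) 0 -
            board.foldl (fun m n => min m n.1) 0 + 1).toNat
          (List.replicate (board.foldl (fun m n => max m n.2.1) 0 -
              board.foldl (fun m n => min m n.2.1) 0 + 1).toNat (0 : Int))) := by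
    simp [board_to_grid_alt, PySem.List.min?_id_cons, PySem.List.max?_id_cons,
      List.foldl_map, pvRem]
  rw [hA, hB]
  set FX := board.foldl (fun m n => min m n.1) 0 with hFX
  set FY := board.foldl (fun m n => min m n.2.1) 0 with hFY
  set LX := board.foldl (fun m n => max m n.1) 0 with hLX
  set LY := board.foldl (fun m n => max m n.2.1) 0 with hLY
  refine List.ext_getElem ?_ ?_
  · rw [List.length_map, PySem.List.length_pyRange_one, pv_scatter_length,
      List.length_replicate]
    omega
  · intro i h1 h2
    have hi' : i < (List.replicate (LX - FX + 1).toNat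
        (List.replicate (LY - FY + 1).toNat (0 : Int))).length := by
      rw [List.length_replicate]
      rw [pv_scatter_length, List.length_replicate] at h2
      exact h2
    have hrow0 : (List.replicate (LX - FX + 1).toNat
        (List.replicate (LY - FY + 1).toNat (0 : Int))).getD i [] =
        List.replicate (LY - FY + 1).toNat (0 : Int) := by
      rw [pv_getD_row _ i hi', List.getElem_replicate]
    rw [List.getElem_map, PySem.List.getElem_pyRange_one]
    refine List.ext_getElem ?_ ?_
    · rw [List.length_map, PySem.List.length_pyRange_one, ← pv_getD_row _ i h2,
        pv_scatter_row_length, hrow0, List.length_replicate]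
      omega
    · intro j hj1 hj2
      have hj0 : j < ((List.replicate (LX - FX + 1).toNat
          (List.replicate (LY - FY + 1).toNat (0 : Int))).getD i []).length := by
        rw [← pv_getD_row _ i h2, pv_scatter_row_length, hrow0] at hj2
        rw [hrow0]
        exact hj2
      rw [List.getElem_map, PySem.List.getElem_pyRange_one,
        pv_getElem_eq_cell _ i j h2 hj2,
        pv_scatter_cell FX FY board _ i j hi' hj0]
      have h0 : pvCell (List.replicate (LX - FX + 1).toNat
          (List.replicate (LY - FY + 1).toNat (0 : Int))) i j = 0 := by
        rw [pvCell, hrow0, List.getD_replicate]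
        rw [hrow0] at hj0
        rw [List.length_replicate] at hj0
        exact hj0
      rw [h0]
      exact pv_cell_eq board hnd FX FY hFX hFY i j

-- ===== VERDICT (by name: the statement is the Claim_ definition above) =====
theorem board_to_grid_spec : Claim_equal_board_to_grid := by
  intro board _ hpre
  unfold Spec_board_to_grid
  exact pv_equal board hpre.1
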